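-- pv_equiv track=rewrite | github.com/SabaBok/GOA_HW | GOA Academy/Level196/HW/hw2.py | min_umbrellas
-- ===== SOURCE A (Python) =====
-- def min_umbrellas(weather):
--     rainy_days = {"rainy", "thunderstorms"}
--     home = 0
--     work = 0
--     min_needed = 0
--     for i in range(len(weather)):
--         w = weather[i]
--         if w in rainy_days:
--             if i % 2 == 0:
--                 if home > 0:
--                     home -= 1
--                     work += 1
--                 else:
--                     min_needed += 1
--                     work += 1
--             else:
--                 if work > 0:
--                     work -= 1
--                     home += 1
--                 else:
--                     min_needed += 1
--                     home += 1
--     return min_needed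
-- ===== SOURCE B (Python) =====
-- def min_umbrellas(weather):
--     # Single pass: the even-day (home) and odd-day (work) umbrella pools evolve
--     # independently; purchases equal the max prefix surplus / deficit of d.
--     d = 0
--     max_d = 0
--     min_d = 0
--     for i, w in enumerate(weather):
--         if w in ("rainy", "thunderstorms"):
--             d += 1 if i % 2 == 0 else -1
--             if d > max_d:
--                 max_d = d
--             if d < min_d:
--                 min_d = d
--     return max_d - min_d
-- ===== Notes on version B (the rewrite author's own statement) =====
-- stated objective: simpler
-- what changed: Replaces A's branching simulation of two umbrella pools (home/work with four conditional branches) by a single running even-minus-odd rainy-day counter whose running max and min give the purchase count in closed form (max_d - min_d).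
import Mathlib
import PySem

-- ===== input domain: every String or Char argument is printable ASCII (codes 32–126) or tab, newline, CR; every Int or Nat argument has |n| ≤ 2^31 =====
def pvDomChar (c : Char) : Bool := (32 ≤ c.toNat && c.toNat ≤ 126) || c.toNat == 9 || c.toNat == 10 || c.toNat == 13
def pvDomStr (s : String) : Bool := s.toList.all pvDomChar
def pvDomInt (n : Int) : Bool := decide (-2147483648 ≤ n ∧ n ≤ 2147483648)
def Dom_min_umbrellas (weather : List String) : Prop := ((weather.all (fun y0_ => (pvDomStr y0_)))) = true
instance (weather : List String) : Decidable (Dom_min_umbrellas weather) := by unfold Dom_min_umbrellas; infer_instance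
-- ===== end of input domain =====

-- B replaces A's branching two-pool simulation with a single running counter
-- whose running max/min give the answer in closed form (objective: simpler).

-- ===== PORT A =====
-- loop body of A: state (home, work, min_needed), item (w, i)
def pvStepA (st : Int × Int × Int) (wi : String × Nat) : Int × Int × Int :=
  let home := st.1; let work := st.2.1; let mn := st.2.2
  let w := wi.1; let i := wi.2
  if w = "rainy" ∨ w = "thunderstorms" then
    if i % 2 = 0 then
      if home > 0 then (home - 1, work + 1, mn)
      else (home, work + 1, mn + 1)
    else
      if work > 0 then (home + 1, work - 1, mn)
      else (home + 1, work, mn + 1)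
  else st

def min_umbrellas (weather : List String) : Int :=
  -- 'for i in range(len(weather)): w = weather[i]' ported as a fold over the indexed list
  (weather.zipIdx.foldl pvStepA (0, 0, 0)).2.2

-- ===== PORT B =====
-- loop body of B: state (d, max_d, min_d), item (w, i)
def pvStepB (st : Int × Int × Int) (wi : String × Nat) : Int × Int × Int :=
  let d := st.1; let mx := st.2.1; let mn := st.2.2
  let w := wi.1; let i := wi.2
  if w = "rainy" ∨ w = "thunderstorms" then
    let d' := if i % 2 = 0 then d + 1 else d - 1
    (d', if d' > mx then d' else mx, if d' < mn then d' else mn)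
  else st

def min_umbrellas_alt (weather : List String) : Int :=
  let r := weather.zipIdx.foldl pvStepB (0, 0, 0)
  r.2.1 - r.2.2

-- ===== PRECONDITION & SPEC =====
def Spec_min_umbrellas (weather : List String) (out : Int) : Prop := out = min_umbrellas_alt weather
instance (weather : List String) (out : Int) : Decidable (Spec_min_umbrellas weather out) := by unfold Spec_min_umbrellas; infer_instance

-- ===== CLAIM (what is proved, stated in full; the proofs are below) =====
def Claim_equal_min_umbrellas : Prop := ∀ (weather : List String), Dom_min_umbrellas weather → Spec_min_umbrellas weather (min_umbrellas weather)

-- ===== LEMMAS AND PROOFS =====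

-- Invariant: A's state (home, work, min_needed) = (mx - d, d - mn, mx - mn) where
-- (d, mx, mn) is B's state, and mn ≤ d ≤ mx, mn ≤ 0 ≤ mx throughout.
lemma pv_inv : ∀ (xs : List String) (k : Nat) (d mx mn : Int),
    mn ≤ d → d ≤ mx → mn ≤ 0 → 0 ≤ mx →
    (xs.zipIdx k).foldl pvStepA (mx - d, d - mn, mx - mn)
      = (((xs.zipIdx k).foldl pvStepB (d, mx, mn)).2.1 - ((xs.zipIdx k).foldl pvStepB (d, mx, mn)).1,
         ((xs.zipIdx k).foldl pvStepB (d, mx, mn)).1 - ((xs.zipIdx k).foldl pvStepB (d, mx, mn)).2.2,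
         ((xs.zipIdx k).foldl pvStepB (d, mx, mn)).2.1 - ((xs.zipIdx k).foldl pvStepB (d, mx, mn)).2.2) := by
  intro xs
  induction xs with
  | nil => intro k d mx mn h1 h2 h3 h4; simp [List.zipIdx]
  | cons x xs ih =>
    intro k d mx mn h1 h2 h3 h4
    rw [List.zipIdx_cons]
    by_cases hw : x = "rainy" ∨ x = "thunderstorms"
    · by_cases hk : k % 2 = 0
      · by_cases hd : d < mx
        · have hA : pvStepA (mx - d, d - mn, mx - mn) (x, k)
              = (mx - (d + 1), (d + 1) - mn, mx - mn) := by
            simp [pvStepA, hw, hk, Prod.ext_iff]; all_goals ((try split_ifs) <;> simp_all <;> omega)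
          have hB : pvStepB (d, mx, mn) (x, k) = (d + 1, mx, mn) := by
            simp [pvStepB, hw, hk, Prod.ext_iff]; all_goals ((try split_ifs) <;> simp_all <;> omega)
          simp only [List.foldl_cons, hA, hB]
          exact ih (k + 1) (d + 1) mx mn (by omega) (by omega) h3 h4
        · have hA : pvStepA (mx - d, d - mn, mx - mn) (x, k)
              = ((mx + 1) - (d + 1), (d + 1) - mn, (mx + 1) - mn) := by
            simp [pvStepA, hw, hk, Prod.ext_iff]; all_goals ((try split_ifs) <;> simp_all <;> omega)
          have hB : pvStepB (d, mx, mn) (x, k) = (d + 1, mx + 1, mn) := by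
            simp [pvStepB, hw, hk, Prod.ext_iff]; all_goals ((try split_ifs) <;> simp_all <;> omega)
          simp only [List.foldl_cons, hA, hB]
          exact ih (k + 1) (d + 1) (mx + 1) mn (by omega) (by omega) h3 (by omega)
      · by_cases hd : mn < d
        · have hA : pvStepA (mx - d, d - mn, mx - mn) (x, k)
              = (mx - (d - 1), (d - 1) - mn, mx - mn) := by
            simp [pvStepA, hw, hk, Prod.ext_iff]; all_goals ((try split_ifs) <;> simp_all <;> omega)
          have hB : pvStepB (d, mx, mn) (x, k) = (d - 1, mx, mn) := by
            simp [pvStepB, hw, hk, Prod.ext_iff]; all_goals ((try split_ifs) <;> simp_all <;> omega)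
          simp only [List.foldl_cons, hA, hB]
          exact ih (k + 1) (d - 1) mx mn (by omega) (by omega) h3 h4
        · have hA : pvStepA (mx - d, d - mn, mx - mn) (x, k)
              = (mx - (d - 1), (d - 1) - (mn - 1), mx - (mn - 1)) := by
            simp [pvStepA, hw, hk, Prod.ext_iff]; all_goals ((try split_ifs) <;> simp_all <;> omega)
          have hB : pvStepB (d, mx, mn) (x, k) = (d - 1, mx, mn - 1) := by
            simp [pvStepB, hw, hk, Prod.ext_iff]; all_goals ((try split_ifs) <;> simp_all <;> omega)
          simp only [List.foldl_cons, hA, hB]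
          exact ih (k + 1) (d - 1) mx (mn - 1) (by omega) (by omega) (by omega) h4
    · have hA : pvStepA (mx - d, d - mn, mx - mn) (x, k) = (mx - d, d - mn, mx - mn) := by
        simp [pvStepA, hw]
      have hB : pvStepB (d, mx, mn) (x, k) = (d, mx, mn) := by
        simp [pvStepB, hw]
      simp only [List.foldl_cons, hA, hB]
      exact ih (k + 1) d mx mn h1 h2 h3 h4

-- ===== VERDICT (by name: the statement is the Claim_ definition above) =====
theorem min_umbrellas_spec : Claim_equal_min_umbrellas := by
  intro weather _
  unfold Spec_min_umbrellas min_umbrellas min_umbrellas_alt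
  have h := pv_inv weather 0 0 0 0 le_rfl le_rfl le_rfl le_rfl
  simp only [sub_self] at h ⊢
  rw [h]
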